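-- pv_equiv track=rewrite | github.com/wheejoo/PythonCodeStudy | 12주차 부르트포스,위클리/백준/영화감독숌/김재환.py | check
-- ===== SOURCE A (Python) =====
-- def check(number):  # 연속 6 3개인지 판별
--     S_number = str(number)
--     for _ in range(0, len(S_number)-2):
--         flag = 0
--         for i in range(3):
--             if S_number[_+i] == '6':
--                 flag += 1
--             if flag == 3:
--                 return True
--     return False
-- ===== SOURCE B (Python) =====
-- def check(number):
--     run = 0
--     for ch in str(number):
--         if ch == '6':
--             run += 1
--             if run == 3:
--                 return True
--         else:
--             run = 0
--     return False
-- ===== Notes on version B (the rewrite author's own statement) =====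
-- stated objective: simpler
-- what changed: Replaced A's nested fixed-size-window scan (every start index re-tested with an inner 3-step counter loop) by a single pass keeping a running count of consecutive '6' characters that returns as soon as the count reaches 3.
import Mathlib
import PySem

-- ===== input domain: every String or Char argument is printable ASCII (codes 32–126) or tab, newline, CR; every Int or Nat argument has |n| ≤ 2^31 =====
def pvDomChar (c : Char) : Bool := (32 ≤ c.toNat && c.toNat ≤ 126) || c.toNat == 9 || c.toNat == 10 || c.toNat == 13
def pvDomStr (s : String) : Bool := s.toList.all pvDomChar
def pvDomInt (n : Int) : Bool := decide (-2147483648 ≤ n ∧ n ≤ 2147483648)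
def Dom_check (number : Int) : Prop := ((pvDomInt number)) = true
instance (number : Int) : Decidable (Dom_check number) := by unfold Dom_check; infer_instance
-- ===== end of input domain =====

-- B: a single pass with a running consecutive-'6' counter replaces A's nested fixed-window scan (objective: simpler).

-- ===== PORT A =====
def check (number : Int) : Bool :=
  let S := (PySem.Int.toStr number).toList
  (PySem.List.pyRange 0 ((S.length : Int) - 2) 1).any (fun st =>
    ((PySem.List.pyRange 0 3 1).foldl
      (fun (p : Nat × Bool) i =>
        if p.2 then p
        else
          let flag := if PySem.List.pyGet? S (st + i) = some '6' then p.1 + 1 else p.1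
          (flag, flag == 3))
      (0, false)).2)

-- ===== PORT B =====
def checkAltGo : List Char → Nat → Bool
  | [], _ => false
  | c :: rest, run =>
    if c = '6' then
      if run + 1 = 3 then true else checkAltGo rest (run + 1)
    else checkAltGo rest 0

def check_alt (number : Int) : Bool :=
  checkAltGo (PySem.Int.toStr number).toList 0

-- ===== PRECONDITION & SPEC =====
def Spec_check (number : Int) (out : Bool) : Prop := out = check_alt number
instance (number : Int) (out : Bool) : Decidable (Spec_check number out) := by unfold Spec_check; infer_instance

-- ===== CLAIM (what is proved, stated in full; the proofs are below) =====
def Claim_equal_check : Prop := ∀ (number : Int), Dom_check number → Spec_check number (check number)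

-- ===== LEMMAS AND PROOFS =====

/-- The list contains three consecutive '6' characters. -/
def Has666 (t : List Char) : Prop :=
  ∃ i : Nat, t[i]? = some '6' ∧ t[i+1]? = some '6' ∧ t[i+2]? = some '6'

lemma has666_short (t : List Char) (h : t.length < 3) : ¬ Has666 t := by
  rintro ⟨i, _, _, h2⟩
  obtain ⟨h2', -⟩ := List.getElem?_eq_some_iff.mp h2
  omega

lemma has666_cons_ne (l : List Char) (c : Char) (t : List Char)
    (hl : l.length ≤ 2) (hc : c ≠ '6') :
    Has666 (l ++ c :: t) ↔ Has666 t := by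
  constructor
  · rintro ⟨i, h0, h1, h2⟩
    by_cases hi : i ≤ l.length
    · exfalso
      have hlen : l.length = i ∨ l.length = i + 1 ∨ l.length = i + 2 := by omega
      have hcval : (l ++ c :: t)[l.length]? = some c := by
        rw [List.getElem?_append_right (le_refl _)]
        simp
      rcases hlen with h | h | h <;> rw [h] at hcval
      · rw [h0] at hcval; exact hc (Option.some.inj hcval).symm
      · rw [h1] at hcval; exact hc (Option.some.inj hcval).symm
      · rw [h2] at hcval; exact hc (Option.some.inj hcval).symm
    · refine ⟨i - l.length - 1, ?_, ?_, ?_⟩ <;>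
      · have hb : ∀ m : Nat, (l ++ c :: t)[i + m]? = t[i - l.length - 1 + m]? := by
          intro m
          rw [List.getElem?_append_right (by omega)]
          have : i + m - l.length = (i - l.length - 1 + m) + 1 := by omega
          rw [this, List.getElem?_cons_succ]
        first
        | (have := hb 0; simp only [Nat.add_zero] at this; rw [← this]; exact h0)
        | (have := hb 1; rw [← this]; exact h1)
        | (have := hb 2; rw [← this]; exact h2)
  · rintro ⟨j, h0, h1, h2⟩
    refine ⟨l.length + 1 + j, ?_, ?_, ?_⟩ <;>
    · have hb : ∀ m : Nat, (l ++ c :: t)[l.length + 1 + j + m]? = t[j + m]? := by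
        intro m
        rw [List.getElem?_append_right (by omega)]
        have : l.length + 1 + j + m - l.length = (j + m) + 1 := by omega
        rw [this, List.getElem?_cons_succ]
      first
      | (have := hb 0; simp only [Nat.add_zero] at this; rw [this]; exact h0)
      | (have := hb 1; rw [this]; exact h1)
      | (have := hb 2; rw [this]; exact h2)

lemma go_iff : ∀ (s : List Char) (run : Nat), run ≤ 2 →
    (checkAltGo s run = true ↔ Has666 (List.replicate run '6' ++ s)) := by
  intro s
  induction s with
  | nil =>
    intro run hrun
    simp only [checkAltGo, List.append_nil]
    constructor
    · intro h; cases h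
    · intro h; exact absurd h (has666_short _ (by rw [List.length_replicate]; omega))
  | cons c rest ih =>
    intro run hrun
    by_cases hc : c = '6'
    · subst hc
      have hkey : List.replicate run '6' ++ '6' :: rest
          = List.replicate (run + 1) '6' ++ rest := by
        rw [List.replicate_succ']; simp
      by_cases h3 : run + 1 = 3
      · have hrun2 : run = 2 := by omega
        subst hrun2
        constructor
        · intro _; exact ⟨0, rfl, rfl, rfl⟩
        · intro _; simp [checkAltGo]
      · have hstep : checkAltGo ('6' :: rest) run = checkAltGo rest (run + 1) := by
          simp [checkAltGo, h3]
        rw [hstep, hkey]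
        exact ih (run + 1) (by omega)
    · simp only [checkAltGo, if_neg hc]
      rw [has666_cons_ne _ _ _ (by simp; omega) hc]
      have := ih 0 (by omega)
      simpa using this

lemma windowA (S : List Char) (st : Int) :
    ((PySem.List.pyRange 0 3 1).foldl
      (fun (p : Nat × Bool) i =>
        if p.2 then p
        else
          let flag := if PySem.List.pyGet? S (st + i) = some '6' then p.1 + 1 else p.1
          (flag, flag == 3))
      (0, false)).2
    = (decide (PySem.List.pyGet? S st = some '6')
        && decide (PySem.List.pyGet? S (st + 1) = some '6')
        && decide (PySem.List.pyGet? S (st + 2) = some '6')) := by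
  have h3 : PySem.List.pyRange 0 3 1 = [0, 1, 2] := by decide
  rw [h3]
  by_cases h0 : PySem.List.pyGet? S (st + 0) = some '6' <;>
  by_cases h1 : PySem.List.pyGet? S (st + 1) = some '6' <;>
  by_cases h2 : PySem.List.pyGet? S (st + 2) = some '6' <;>
  · rw [show st + 0 = st from by ring] at h0
    simp [List.foldl, h0, h1, h2]

lemma check_iff (number : Int) :
    check number = true ↔ Has666 (PySem.Int.toStr number).toList := by
  unfold check
  set S := (PySem.Int.toStr number).toList with hS
  rw [List.any_eq_true]
  constructor
  · rintro ⟨st, hmem, hw⟩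
    rw [PySem.List.mem_pyRange_one] at hmem
    rw [windowA] at hw
    simp only [Bool.and_eq_true, decide_eq_true_eq] at hw
    obtain ⟨⟨g0, g1⟩, g2⟩ := hw
    refine ⟨st.toNat, ?_, ?_, ?_⟩
    · rw [PySem.List.pyGet?_of_nonneg S hmem.1] at g0; exact g0
    · rw [PySem.List.pyGet?_of_nonneg S (by omega)] at g1
      have : (st + 1).toNat = st.toNat + 1 := by omega
      rw [this] at g1; exact g1
    · rw [PySem.List.pyGet?_of_nonneg S (by omega)] at g2
      have : (st + 2).toNat = st.toNat + 2 := by omega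
      rw [this] at g2; exact g2
  · rintro ⟨i, h0, h1, h2⟩
    have hlen : i + 2 < S.length := (List.getElem?_eq_some_iff.mp h2).1
    refine ⟨(i : Int), ?_, ?_⟩
    · rw [PySem.List.mem_pyRange_one]
      constructor
      · exact_mod_cast Int.natCast_nonneg i
      · omega
    · rw [windowA]
      simp only [Bool.and_eq_true, decide_eq_true_eq]
      refine ⟨⟨?_, ?_⟩, ?_⟩
      · rw [PySem.List.pyGet?_natCast S i]; exact h0
      · rw [show (i : Int) + 1 = ((i + 1 : Nat) : Int) from by push_cast; ring,
          PySem.List.pyGet?_natCast S (i+1)]; exact h1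
      · rw [show (i : Int) + 2 = ((i + 2 : Nat) : Int) from by push_cast; ring,
          PySem.List.pyGet?_natCast S (i+2)]; exact h2

lemma check_alt_iff (number : Int) :
    check_alt number = true ↔ Has666 (PySem.Int.toStr number).toList := by
  unfold check_alt
  have := go_iff (PySem.Int.toStr number).toList 0 (by omega)
  simpa using this

-- ===== VERDICT (by name: the statement is the Claim_ definition above) =====
theorem check_spec : Claim_equal_check := by
  intro number _
  unfold Spec_check
  rw [Bool.eq_iff_iff, check_iff, check_alt_iff]
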